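-- pv_equiv track=rewrite | github.com/Serial-Studio/Serial-Studio | scripts/code-verify.py | _comment_payload
-- ===== SOURCE A (Python) =====
-- def _comment_payload(line: str) -> str | None:
--     """Return the text after `//`/`///`/`//!` markers on a `//` comment line,
--     or None when the line isn't a single-line comment. Leading/trailing
--     whitespace is preserved on the payload so anchored patterns still see
--     the start of the prose."""
--     stripped = line.lstrip()
--     if not stripped.startswith("//"):
--         return None
--     # Strip up to three slashes plus an optional `!` (`///`, `//!`, `///!`)
--     # then a single space if present.
--     j = 2
--     while j < len(stripped) and stripped[j] == "/":
--         j += 1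
--     if j < len(stripped) and stripped[j] == "!":
--         j += 1
--     if j < len(stripped) and stripped[j] == " ":
--         j += 1
--     return stripped[j:]
-- ===== SOURCE B (Python) =====
-- def _comment_payload(line: str) -> str | None:
--     stripped = line.lstrip()
--     if not stripped.startswith("//"):
--         return None
--     rest = stripped.lstrip("/")
--     if rest.startswith("! "):
--         return rest[2:]
--     if rest.startswith("!") or rest.startswith(" "):
--         return rest[1:]
--     return rest
-- ===== Notes on version B (the rewrite author's own statement) =====
-- stated objective: simpler
-- what changed: Replaces A's manual index-advancing scan (while-loop over slash positions plus two index-bump ifs and a final slice) with a strip of leading slashes followed by declarative prefix tests for bang-space, bang and space that slice off the matched marker.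
import Mathlib
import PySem

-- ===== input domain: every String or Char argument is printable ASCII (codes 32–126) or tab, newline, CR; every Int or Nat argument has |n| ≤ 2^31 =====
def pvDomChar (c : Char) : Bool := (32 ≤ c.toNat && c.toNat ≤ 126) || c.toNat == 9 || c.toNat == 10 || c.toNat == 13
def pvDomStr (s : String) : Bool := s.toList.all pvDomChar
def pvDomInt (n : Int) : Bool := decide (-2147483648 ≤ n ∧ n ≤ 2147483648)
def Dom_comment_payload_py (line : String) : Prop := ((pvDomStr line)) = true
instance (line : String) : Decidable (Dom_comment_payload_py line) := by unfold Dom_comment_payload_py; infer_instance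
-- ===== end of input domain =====

-- B replaces A's index-advancing slash/bang/space scan by lstrip("/") plus prefix-removal branches (simpler).


-- ===== PORT A =====
-- the `while j < len(stripped) and stripped[j] == "/": j += 1` loop
def pvSlashLoop (s : List Char) (j : Nat) : Nat :=
  if h : j < s.length ∧ s[j]! = '/' then pvSlashLoop s (j + 1) else j
termination_by s.length - j
decreasing_by omega

def comment_payload_py (line : String) : Option String :=
  let stripped := PySem.Str.lstrip line
  if PySem.Str.startswith stripped "//" then
    let cs := stripped.toList
    let j1 := pvSlashLoop cs 2
    let j2 := if j1 < cs.length ∧ cs[j1]! = '!' then j1 + 1 else j1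
    let j3 := if j2 < cs.length ∧ cs[j2]! = ' ' then j2 + 1 else j2
    -- stripped[j:] with 0 ≤ j : drop is exact here
    some (String.ofList (cs.drop j3))
  else none

-- ===== PORT B =====
def comment_payload_py_alt (line : String) : Option String :=
  let stripped := PySem.Str.lstrip line
  if PySem.Str.startswith stripped "//" then
    -- stripped.lstrip("/"): drop the leading '/' characters (exact hand port of str.lstrip with a chars argument)
    let rest := String.ofList (stripped.toList.dropWhile (· == '/'))
    if PySem.Str.startswith rest "! " then some (PySem.Str.slice rest (some 2) none)
    else if PySem.Str.startswith rest "!" || PySem.Str.startswith rest " " then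
      some (PySem.Str.slice rest (some 1) none)
    else some rest
  else none

-- ===== PRECONDITION & SPEC =====
def Spec_comment_payload_py (line : String) (out : Option String) : Prop := out = comment_payload_py_alt line
instance (line : String) (out : Option String) : Decidable (Spec_comment_payload_py line out) := by unfold Spec_comment_payload_py; infer_instance

-- ===== CLAIM (what is proved, stated in full; the proofs are below) =====
def Claim_equal_comment_payload_py : Prop := ∀ (line : String), Dom_comment_payload_py line → Spec_comment_payload_py line (comment_payload_py line)

-- ===== LEMMAS AND PROOFS =====

theorem pvSlashLoop_eq (s : List Char) (j : Nat) :
    pvSlashLoop s j = j + ((s.drop j).takeWhile (· == '/')).length := by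
  fun_induction pvSlashLoop s j with
  | case1 j h ih =>
    obtain ⟨hj, hc⟩ := h
    have hcg : s[j] = '/' := by rwa [getElem!_pos s j hj] at hc
    have hdrop : s.drop j = s[j] :: s.drop (j + 1) := List.drop_eq_getElem_cons hj
    rw [ih, hdrop]
    simp [hcg]
    omega
  | case2 j h =>
    by_cases hj : j < s.length
    · have hc : ¬ s[j] = '/' := fun hc => h ⟨hj, by rwa [getElem!_pos s j hj]⟩
      have hdrop : s.drop j = s[j] :: s.drop (j + 1) := List.drop_eq_getElem_cons hj
      rw [hdrop]
      simp [hc]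
    · rw [List.drop_eq_nil_of_le (by omega)]; simp

theorem pv_drop_len_takeWhile (p : Char → Bool) (l : List Char) :
    l.drop (l.takeWhile p).length = l.dropWhile p := by
  induction l with
  | nil => simp
  | cons a l ih =>
    by_cases h : p a <;> simp [h, ih]

theorem pv_dropFacts (cs : List Char) (j : Nat) (c : Char) (u : List Char)
    (h : cs.drop j = c :: u) :
    j < cs.length ∧ cs.drop (j + 1) = u := by
  have hlen : cs.length - j = u.length + 1 := by
    have := congrArg List.length h; simpa using this
  refine ⟨by omega, ?_⟩
  have := congrArg List.tail h
  simpa [List.tail_drop] using this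

theorem pv_drop_getElem (cs : List Char) (j : Nat) (c : Char) (u : List Char)
    (h : cs.drop j = c :: u) (hj : j < cs.length) : cs[j] = c := by
  have h0 : cs[j]? = some c := by
    have := congrArg (fun l => l[0]?) h
    simpa [List.getElem?_drop] using this
  rw [List.getElem?_eq_getElem hj] at h0
  exact Option.some.inj h0

theorem pv_drop_nil (cs : List Char) (j : Nat) (h : cs.drop j = []) : ¬ j < cs.length := by
  have := congrArg List.length h; simp at this; omega

theorem comment_payload_py_spec : Claim_equal_comment_payload_py := by
  intro line _
  unfold Spec_comment_payload_py comment_payload_py comment_payload_py_alt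
  by_cases hstart : PySem.Str.startswith (PySem.Str.lstrip line) "//" = true
  · obtain ⟨t, ht⟩ : ∃ t, (PySem.Str.lstrip line).toList = '/' :: '/' :: t := by
      have hpre : ("//".toList) <+: (PySem.Str.lstrip line).toList :=
        (PySem.Chars.startswith_iff _ _).1 (by simpa using hstart)
      obtain ⟨u, hu⟩ := hpre
      exact ⟨u, by simpa using hu.symm⟩
    have hloop : pvSlashLoop (PySem.Str.lstrip line).toList 2
        = 2 + (t.takeWhile (· == '/')).length := by
      rw [pvSlashLoop_eq]; congr 2; simp [ht]
    set k := (t.takeWhile (· == '/')).length with hk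
    have hdrop1 : (PySem.Str.lstrip line).toList.drop (2 + k) = t.dropWhile (· == '/') := by
      rw [ht, show 2 + k = k + 2 from by omega]
      simpa using pv_drop_len_takeWhile (· == '/') t
    have hdw : (PySem.Str.lstrip line).toList.dropWhile (· == '/') = t.dropWhile (· == '/') := by
      rw [ht]; simp
    simp only [PySem.Str.toList_lstrip] at ht hloop hdrop1 hdw
    have hpre2 : ['/', '/'] <+: PySem.Chars.lstrip line.toList := by
      rw [ht]; exact ⟨t, rfl⟩
    rcases hrl : t.dropWhile (· == '/') with _ | ⟨c, u⟩
    · rw [hrl] at hdrop1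
      have hnl := pv_drop_nil _ _ hdrop1
      simp [hloop, hdw, hrl, hnl, hdrop1, hpre2,
        PySem.Str.startswith_eq, PySem.Chars.startswith, List.isPrefixOf]
    · rw [hrl] at hdrop1
      obtain ⟨hj1, hd2⟩ := pv_dropFacts _ _ _ _ hdrop1
      have hc1 := pv_drop_getElem _ _ _ _ hdrop1 hj1
      by_cases hcb : c = '!'
      · subst hcb
        rcases u with _ | ⟨c2, v⟩
        · have hnl2 := pv_drop_nil _ _ hd2
          simp [hloop, hdw, hrl, hj1, hc1, hnl2, hd2, hpre2,
            PySem.Str.startswith_eq, PySem.Chars.startswith, List.isPrefixOf,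
            PySem.Str.slice, PySem.List.slice_from _ (by norm_num : (0:Int) ≤ 1)]
        · obtain ⟨hj2, hd3⟩ := pv_dropFacts _ _ _ _ hd2
          have hc2g := pv_drop_getElem _ _ _ _ hd2 hj2
          by_cases hc2 : c2 = ' '
          · subst hc2
            simp [hloop, hdw, hrl, hj1, hc1, hj2, hc2g, hd3, hpre2,
              PySem.Str.startswith_eq, PySem.Chars.startswith, List.isPrefixOf,
              PySem.Str.slice, PySem.List.slice_from _ (by norm_num : (0:Int) ≤ 2)]
          · simp [hloop, hdw, hrl, hj1, hc1, hj2, hc2g, hc2, hd2, hpre2,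
              Ne.symm hc2,
              PySem.Str.startswith_eq, PySem.Chars.startswith, List.isPrefixOf,
              PySem.Str.slice, PySem.List.slice_from _ (by norm_num : (0:Int) ≤ 1)]
      · by_cases hcs : c = ' '
        · subst hcs
          simp [hloop, hdw, hrl, hj1, hc1, hcb, hd2, hpre2,
            PySem.Str.startswith_eq, PySem.Chars.startswith, List.isPrefixOf,
            PySem.Str.slice, PySem.List.slice_from _ (by norm_num : (0:Int) ≤ 1)]
        · simp [hloop, hdw, hrl, hj1, hc1, hcb, hcs, hdrop1, hpre2,
            Ne.symm hcb, Ne.symm hcs,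
            PySem.Str.startswith_eq, PySem.Chars.startswith, List.isPrefixOf]
  · simp only [PySem.Str.startswith_eq, PySem.Str.toList_lstrip, show "//".toList = ['/', '/'] from rfl] at hstart
    simp [hstart]
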